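-- pv_equiv track=rewrite | github.com/acp12395/MapSim | module/StringProcessor.py | prettyString
-- ===== SOURCE A (Python) =====
-- def prettyString(text):
--     text = text.upper()
--     retStr = str()
--     index = 0
--     foundLetterOrNumber = True
--     foundComma = True
--     while index < len(text):
--         if text[index] >= '0' and text[index] <= '9' or text[index] >= 'A' and text[index] <= 'Z' or text[index] == '.':
--             if not foundLetterOrNumber:
--                 if not foundComma:
--                     retStr = retStr + ' '
--             foundLetterOrNumber = True
--             foundComma = False
--             retStr = retStr + text[index]
--         elif text[index] == ',':
--             foundLetterOrNumber = False
--             if not foundComma: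
--                 foundComma = True
--                 retStr = retStr + ", "
--         else:
--             foundLetterOrNumber = False
--         index = index + 1
--     return retStr.removesuffix(", ")
-- ===== SOURCE B (Python) =====
-- def prettyString(text):
--     text = text.upper()
--
--     def is_tok(c):
--         return '0' <= c <= '9' or 'A' <= c <= 'Z' or c == '.'
--
--     out = []
--     i, n = 0, len(text)
--     prev_end = None           # end index of the previous token, None before the first token
--     while i < n:
--         if is_tok(text[i]):
--             j = i
--             while j < n and is_tok(text[j]):
--                 j += 1
--             tok = text[i:j]
--             if prev_end is None:
--                 out.append(tok)
--             elif ',' in text[prev_end:i]: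
--                 out.append(', ' + tok)
--             else:
--                 out.append(' ' + tok)
--             prev_end = j
--             i = j
--         else:
--             i += 1
--     return ''.join(out)
-- ===== Notes on version B (the rewrite author's own statement) =====
-- stated objective: simpler
-- what changed: Replaces A's per-character state machine (foundLetterOrNumber/foundComma flags plus a trailing-suffix strip) with a tokenize-then-join pass: scan maximal token runs and emit each later token prefixed by comma-space if the gap before it contains a comma, else by a single space; pieces are joined once instead of concatenating the string char by char.
import Mathlib
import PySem

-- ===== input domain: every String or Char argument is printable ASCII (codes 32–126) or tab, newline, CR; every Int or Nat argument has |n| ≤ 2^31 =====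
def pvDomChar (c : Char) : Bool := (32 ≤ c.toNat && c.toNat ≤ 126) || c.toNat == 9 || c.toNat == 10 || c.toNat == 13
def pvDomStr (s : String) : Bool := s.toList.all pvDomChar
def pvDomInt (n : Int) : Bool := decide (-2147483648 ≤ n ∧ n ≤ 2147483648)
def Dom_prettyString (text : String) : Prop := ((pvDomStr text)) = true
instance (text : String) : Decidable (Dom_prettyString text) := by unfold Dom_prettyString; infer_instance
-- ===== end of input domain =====

-- B replaces A's per-character state machine (foundLetterOrNumber/foundComma flags plus a
-- trailing-", " strip) by a tokenize-then-join pass: simpler, no state flags, no suffix fixup (and measured faster).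

-- ===== PORT A =====
-- token test, A's condition: '0'<=c<='9' or 'A'<=c<='Z' or c=='.'
def pvIsTok (c : Char) : Bool := ('0' ≤ c && c ≤ '9') || ('A' ≤ c && c ≤ 'Z') || (c == '.')

-- A's while loop over the characters, state (retStr, foundLetterOrNumber, foundComma)
def pvAFold : List Char → List Char → Bool → Bool → List Char
  | [], r, _, _ => r
  | c :: cs, r, fLN, fC =>
    if pvIsTok c then
      pvAFold cs ((if !fLN && !fC then r ++ [' '] else r) ++ [c]) true false
    else if c == ',' then
      pvAFold cs (if fC then r else r ++ [',', ' ']) false true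
    else
      pvAFold cs r false fC

-- exact port of str.removesuffix: drop suf iff it is a suffix (PySem has no removesuffix)
def pvRemovesuffix (suf l : List Char) : List Char :=
  if suf.isSuffixOf l then l.take (l.length - suf.length) else l

def prettyString (text : String) : String :=
  String.ofList (pvRemovesuffix [',', ' '] (pvAFold (PySem.Str.upper text).toList [] true true))

-- ===== PORT B =====
-- B's outer while: on a token head consume the maximal token run (the inner while),
-- emit it with its separator prefix; otherwise extend the gap since the previous token.
-- `gap` is text[prev_end:i]; `first` is `prev_end is None`; output pieces are emitted
-- in order (''.join of B's out list = the flattened result built here).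
def pvBGo : List Char → List Char → Bool → List Char
  | [], _, _ => []
  | c :: cs, gap, first =>
    if h : pvIsTok c then
      (if first then (c :: cs).takeWhile pvIsTok
       else (if ',' ∈ gap then [',', ' '] else [' ']) ++ (c :: cs).takeWhile pvIsTok)
        ++ pvBGo ((c :: cs).dropWhile pvIsTok) [] false
    else
      pvBGo cs (gap ++ [c]) first
termination_by cs _ _ => cs.length
decreasing_by
  · simp [h]
    exact List.length_dropWhile_le _ _
  · simp

def prettyString_alt (text : String) : String :=
  String.ofList (pvBGo (PySem.Str.upper text).toList [] true)

-- ===== PRECONDITION & SPEC =====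
def Spec_prettyString (text : String) (out : String) : Prop := out = prettyString_alt text
instance (text : String) (out : String) : Decidable (Spec_prettyString text out) := by unfold Spec_prettyString; infer_instance

-- ===== CLAIM (what is proved, stated in full; the proofs are below) =====
def Claim_equal_prettyString : Prop := ∀ (text : String), Dom_prettyString text → Spec_prettyString text (prettyString text)

-- ===== LEMMAS AND PROOFS =====

-- "r ends with a token character" — invariant for A's retStr right after a token
def pvEndsTok (r : List Char) : Prop := ∃ t c, r = t ++ [c] ∧ pvIsTok c = true

theorem pvEndsTok_app (x tok : List Char) (hne : tok ≠ []) (h : ∀ c ∈ tok, pvIsTok c = true) :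
    pvEndsTok (x ++ tok) := by
  refine ⟨x ++ tok.dropLast, tok.getLast hne, ?_, h _ (List.getLast_mem hne)⟩
  rw [List.append_assoc, List.dropLast_append_getLast hne]

theorem pvRs_endsTok (r : List Char) (h : pvEndsTok r) : pvRemovesuffix [',', ' '] r = r := by
  obtain ⟨t, c, rfl, hc⟩ := h
  rw [pvRemovesuffix, if_neg]
  intro hsuf
  rw [List.isSuffixOf_iff_suffix] at hsuf
  obtain ⟨s, hs⟩ := hsuf
  have := congrArg List.reverse hs
  simp at this
  obtain ⟨h1, -⟩ := this
  rw [← h1] at hc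
  exact absurd hc (by decide)

theorem pvRs_comsp (r : List Char) : pvRemovesuffix [',', ' '] (r ++ [',', ' ']) = r := by
  rw [pvRemovesuffix, if_pos]
  · simp
  · rw [List.isSuffixOf_iff_suffix]; exact List.suffix_append r _

-- the head of dropWhile fails the predicate
theorem pvDropWhile_head (p : Char → Bool) (l : List Char) :
    l.dropWhile p = [] ∨ p (l.dropWhile p).headI = false := by
  induction l with
  | nil => exact Or.inl rfl
  | cons c cs ih =>
    by_cases h : p c
    · simpa [List.dropWhile_cons, h] using ih
    · right; simp [h]

-- pvBGo reads its gap only through ',' ∈ gap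
theorem pvBGo_gapCongr : ∀ n (cs : List Char), cs.length ≤ n → ∀ g1 g2 f,
    (',' ∈ g1 ↔ ',' ∈ g2) → pvBGo cs g1 f = pvBGo cs g2 f := by
  intro n
  induction n with
  | zero =>
    intro cs hcs g1 g2 f _
    simp at hcs; subst hcs; rw [pvBGo, pvBGo]
  | succ n ih =>
    intro cs hcs g1 g2 f hg
    cases cs with
    | nil => rw [pvBGo, pvBGo]
    | cons c cs' =>
      by_cases h : pvIsTok c = true
      · rw [pvBGo, pvBGo]
        simp only [h, dif_pos]
        rw [if_congr hg rfl rfl]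
      · rw [pvBGo, pvBGo]
        simp only [h, Bool.false_eq_true, dif_neg, not_false_iff]
        exact ih cs' (by simpa using Nat.lt_succ_iff.mp (lt_of_lt_of_le (by simp) hcs)) _ _ f
          (by simp [List.mem_append, hg])

-- A's loop over a run of token characters from state (fLN, fC) = (true, false)
theorem pvAFold_run (tok : List Char) : ∀ rest r, (∀ c ∈ tok, pvIsTok c = true) →
    pvAFold (tok ++ rest) r true false = pvAFold rest (r ++ tok) true false := by
  induction tok with
  | nil => intro rest r _; simp
  | cons c t ih =>
    intro rest r h
    have hc : pvIsTok c = true := h c (by simp)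
    rw [List.cons_append, pvAFold, if_pos hc]
    simp only [Bool.not_true, Bool.false_and, if_neg (by simp : ¬((false : Bool) = true))]
    rw [ih rest (r ++ [c]) (fun d hd => h d (by simp [hd]))]
    simp

-- the master invariant: A's state machine against B's tokenizer, all reachable state shapes
set_option maxRecDepth 8192 in
theorem pvMaster : ∀ n (cs : List Char), cs.length ≤ n →
    ((∀ (fLN : Bool) (g : List Char),
        pvRemovesuffix [',', ' '] (pvAFold cs [] fLN true) = pvBGo cs g true)
    ∧ (∀ r, pvEndsTok r → (cs = [] ∨ pvIsTok cs.headI = false) →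
        pvRemovesuffix [',', ' '] (pvAFold cs r true false) = r ++ pvBGo cs [] false)
    ∧ (∀ r, pvEndsTok r →
        pvRemovesuffix [',', ' '] (pvAFold cs r false false) = r ++ pvBGo cs [] false)
    ∧ (∀ r, pvRemovesuffix [',', ' '] (pvAFold cs (r ++ [',', ' ']) false true)
          = r ++ pvBGo cs [','] false)) := by
  intro n
  induction n with
  | zero =>
    intro cs hcs
    simp at hcs; subst hcs
    refine ⟨fun fLN g => by rw [pvBGo]; rfl,
            fun r hr _ => by rw [pvBGo]; simpa using pvRs_endsTok r hr,
            fun r hr => by rw [pvBGo]; simpa using pvRs_endsTok r hr,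
            fun r => by rw [pvBGo]; simpa using pvRs_comsp r⟩
  | succ n ih =>
    intro cs hcs
    cases cs with
    | nil =>
      refine ⟨fun fLN g => by rw [pvBGo]; rfl,
              fun r hr _ => by rw [pvBGo]; simpa using pvRs_endsTok r hr,
              fun r hr => by rw [pvBGo]; simpa using pvRs_endsTok r hr,
              fun r => by rw [pvBGo]; simpa using pvRs_comsp r⟩
    | cons c cs' =>
      have hn' : cs'.length ≤ n := by simp at hcs; omega
      have hsplit : cs' = cs'.takeWhile pvIsTok ++ cs'.dropWhile pvIsTok :=
        (List.takeWhile_append_dropWhile).symm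
      have htw : ∀ d ∈ cs'.takeWhile pvIsTok, pvIsTok d = true :=
        fun d hd => List.mem_takeWhile_imp hd
      have hdwlen : (cs'.dropWhile pvIsTok).length ≤ n :=
        le_trans (List.length_dropWhile_le _ _) hn'
      have tokStep : pvIsTok c = true → ∀ r₀ : List Char,
          pvRemovesuffix [',', ' '] (pvAFold cs' (r₀ ++ [c]) true false)
            = r₀ ++ ((c :: cs'.takeWhile pvIsTok) ++ pvBGo (cs'.dropWhile pvIsTok) [] false) := by
        intro hc r₀
        conv_lhs => rw [hsplit]
        rw [pvAFold_run _ _ _ htw]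
        have h1 := (ih _ hdwlen).2.1 (r₀ ++ [c] ++ cs'.takeWhile pvIsTok)
          (by
            have := pvEndsTok_app r₀ (c :: cs'.takeWhile pvIsTok) (by simp)
              (by
                intro d hd
                rcases List.mem_cons.mp hd with h | h
                · exact h ▸ hc
                · exact htw d h)
            simpa [List.append_assoc] using this)
          (pvDropWhile_head _ _)
        rw [show (r₀ ++ [c]) ++ cs'.takeWhile pvIsTok = r₀ ++ [c] ++ cs'.takeWhile pvIsTok from rfl,
            h1]
        simp
      refine ⟨?_, ?_, ?_, ?_⟩
      · -- (0) no token seen yet: r = [], fC = true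
        intro fLN g
        by_cases hc : pvIsTok c = true
        · rw [pvAFold, if_pos hc, pvBGo]
          simpa [hc] using tokStep hc []
        · rw [pvAFold, if_neg (by simp [hc]), pvBGo]
          simp only [hc, Bool.false_eq_true, dif_neg, not_false_iff]
          by_cases hcm : c == ','
          · rw [if_pos hcm]
            simpa using (ih cs' hn').1 false (g ++ [c])
          · rw [if_neg hcm]
            exact (ih cs' hn').1 false (g ++ [c])
      · -- (i) just after a token: gap empty, head of cs is not a token char
        intro r hr hhead
        have hc : pvIsTok c = false := by
          rcases hhead with h | h
          · exact absurd h (by simp)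
          · simpa using h
        rw [pvAFold, if_neg (by simp [hc]), pvBGo]
        simp only [hc, Bool.false_eq_true, dif_neg, not_false_iff]
        by_cases hcm : c == ','
        · rw [if_pos hcm]
          have hc' : c = ',' := by simpa using hcm
          subst hc'
          rw [if_neg not_false, List.nil_append]
          exact (ih cs' hn').2.2.2 r
        · rw [if_neg hcm]
          rw [pvBGo_gapCongr n cs' hn' ([] ++ [c]) [] false
            (by
              rw [List.nil_append]
              exact iff_of_false
                (fun hmem => hcm (beq_iff_eq.mpr (List.mem_singleton.mp hmem).symm))
                List.not_mem_nil)]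
          exact (ih cs' hn').2.2.1 r hr
      · -- (ii) in a comma-free gap after a token
        intro r hr
        by_cases hc : pvIsTok c = true
        · rw [pvAFold, if_pos hc, pvBGo]
          simp only [hc, dif_pos, List.takeWhile_cons_of_pos hc, List.dropWhile_cons_of_pos hc]
          rw [show (if (!false && !false) = true then r ++ [' '] else r) = r ++ [' '] by simp,
              tokStep hc (r ++ [' '])]
          simp [List.append_assoc]
        · rw [pvAFold, if_neg (by simp [hc]), pvBGo]
          simp only [hc, Bool.false_eq_true, dif_neg, not_false_iff]
          by_cases hcm : c == ','
          · rw [if_pos hcm]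
            have hc' : c = ',' := by simpa using hcm
            subst hc'
            rw [if_neg not_false, List.nil_append]
            exact (ih cs' hn').2.2.2 r
          · rw [if_neg hcm]
            rw [pvBGo_gapCongr n cs' hn' ([] ++ [c]) [] false
              (by
              rw [List.nil_append]
              exact iff_of_false
                (fun hmem => hcm (beq_iff_eq.mpr (List.mem_singleton.mp hmem).symm))
                List.not_mem_nil)]
            exact (ih cs' hn').2.2.1 r hr
      · -- (iii) a comma already seen in the gap: A carries the eager ", "
        intro r
        by_cases hc : pvIsTok c = true
        · rw [pvAFold, if_pos hc, pvBGo]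
          simp only [hc, dif_pos, List.takeWhile_cons_of_pos hc, List.dropWhile_cons_of_pos hc]
          rw [show (if (!false && !true) = true then (r ++ [',', ' ']) ++ [' ']
                else r ++ [',', ' ']) = r ++ [',', ' '] by simp,
              tokStep hc (r ++ [',', ' '])]
          simp [List.append_assoc]
        · rw [pvAFold, if_neg (by simp [hc]), pvBGo]
          simp only [hc, Bool.false_eq_true, dif_neg, not_false_iff]
          by_cases hcm : c == ','
          · rw [if_pos hcm, if_true]
            rw [pvBGo_gapCongr n cs' hn' ([','] ++ [c]) [','] false (by simp)]
            exact (ih cs' hn').2.2.2 r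
          · rw [if_neg hcm]
            rw [pvBGo_gapCongr n cs' hn' ([','] ++ [c]) [','] false (by simp)]
            exact (ih cs' hn').2.2.2 r

-- ===== VERDICT (by name: the statement is the Claim_ definition above) =====
theorem prettyString_spec : Claim_equal_prettyString := by
  intro text _
  unfold Spec_prettyString prettyString prettyString_alt
  exact congrArg String.ofList
    ((pvMaster (PySem.Str.upper text).toList.length _ le_rfl).1 true [])
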